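-- pv_equiv track=rewrite | github.com/marinicadenisandrei/leetcodePython | 407. Trapping Rain Water II.py | count_vertical_trapped_x
-- ===== SOURCE A (Python) =====
-- def count_vertical_trapped_x(board, num):
--     rows = len(board)
--     cols = len(board[0])
--     count = 0
--
--     for r in range(rows):
--         for c in range(cols):
--             if board[r][c] == 'X':
--                 above = False
--                 for rr in range(r - 1, -1, -1):
--                     if board[rr][c] == num:
--                         above = True
--                         break
--
--                 below = False
--                 for rr in range(r + 1, rows):
--                     if board[rr][c] == num:
--                         below = True
--                         break
--
--                 if above and below:
--                     count += 1
--
--     return (count > 0, count)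
-- ===== SOURCE B (Python) =====
-- def count_vertical_trapped_x(board, num):
--     # One pass per column with a running 'seen above' flag and a countdown of
--     # occurrences of num remaining below, instead of re-scanning the column around every 'X' cell.
--     cols = len(board[0])
--     count = 0
--     for c in range(cols):
--         col = [row[c] for row in board]
--         seen_above = False
--         remaining_below = col.count(num)
--         for v in col:
--             if v == num:
--                 remaining_below -= 1
--             if v == 'X' and seen_above and remaining_below > 0:
--                 count += 1
--             if v == num:
--                 seen_above = True
--     return (count > 0, count)
-- ===== Notes on version B (the rewrite author's own statement) =====
-- stated objective: alternative
-- what changed: Instead of re-scanning the column above and below every 'X' cell, B walks each column once keeping a seen-above flag and a countdown of num occurrences remaining below.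
import Mathlib
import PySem

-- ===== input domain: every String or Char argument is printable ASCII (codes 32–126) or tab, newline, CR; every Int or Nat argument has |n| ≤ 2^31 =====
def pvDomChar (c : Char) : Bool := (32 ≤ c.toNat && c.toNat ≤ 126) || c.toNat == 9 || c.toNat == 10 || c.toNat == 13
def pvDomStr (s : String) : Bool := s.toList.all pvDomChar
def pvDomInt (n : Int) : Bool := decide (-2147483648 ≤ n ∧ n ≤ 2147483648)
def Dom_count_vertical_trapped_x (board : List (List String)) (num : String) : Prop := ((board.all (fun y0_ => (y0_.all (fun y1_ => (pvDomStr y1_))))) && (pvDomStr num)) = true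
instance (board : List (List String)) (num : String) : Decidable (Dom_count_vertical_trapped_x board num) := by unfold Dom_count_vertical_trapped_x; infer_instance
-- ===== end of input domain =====

-- B replaces A's per-'X'-cell rescans of the column above and below by a single walk
-- down each column with a seen-above flag and a countdown of `num`s remaining below.

-- ===== PORT A =====
-- board[r][c]; indices are in range on every access under Pre_ (out of range = Python IndexError, excluded by Pre_)
def pvCellA (board : List (List String)) (r c : Int) : String :=
  PySem.List.pyGetD (PySem.List.pyGetD board r []) c ""

-- 'for rr in idxs: if board[rr][c] == num: flag = True; break'
def pvScanA (board : List (List String)) (num : String) (c : Int) : List Int → Bool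
  | [] => false
  | rr :: rest => if pvCellA board rr c = num then true else pvScanA board num c rest

def count_vertical_trapped_x (board : List (List String)) (num : String) : Bool × Int :=
  let rows : Int := board.length
  let cols : Int := (PySem.List.pyGetD board 0 []).length
  let count : Int :=
    (PySem.List.pyRange 0 rows 1).foldl (fun count r =>
      (PySem.List.pyRange 0 cols 1).foldl (fun count c =>
        if pvCellA board r c = "X" then
          let above := pvScanA board num c (PySem.List.pyRange (r - 1) (-1) (-1))
          let below := pvScanA board num c (PySem.List.pyRange (r + 1) rows 1)
          if above && below then count + 1 else count
        else count) count) 0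
  (decide (0 < count), count)

-- ===== PORT B =====
-- the inner 'for v in col' loop of Source B; state = (seen_above, remaining_below, count)
def pvColLoop (num : String) : List String → Bool → Int → Int → Int
  | [], _, _, count => count
  | v :: rest, seen, rem, count =>
    let rem' := if v = num then rem - 1 else rem
    let count' := if v = "X" ∧ seen = true ∧ 0 < rem' then count + 1 else count
    let seen' := if v = num then true else seen
    pvColLoop num rest seen' rem' count'

def count_vertical_trapped_x_alt (board : List (List String)) (num : String) : Bool × Int :=
  let cols : Int := (PySem.List.pyGetD board 0 []).length
  let count : Int :=
    (PySem.List.pyRange 0 cols 1).foldl (fun count c =>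
      let col := board.map (fun row => PySem.List.pyGetD row c "")
      pvColLoop num col false (col.count num : Int) count) 0
  (decide (0 < count), count)

-- ===== PRECONDITION & SPEC =====
-- Pre_ excludes exactly the inputs where Python A raises IndexError: the empty board
-- (board[0]) and ragged boards having a row shorter than the first row (board[r][c]).
def Pre_count_vertical_trapped_x (board : List (List String)) (num : String) : Prop :=
  board ≠ [] ∧ ∀ row ∈ board, board.headI.length ≤ row.length
instance (board : List (List String)) (num : String) : Decidable (Pre_count_vertical_trapped_x board num) := by unfold Pre_count_vertical_trapped_x; infer_instance

def pvWitness_count_vertical_trapped_x : List (List String) × String :=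
  ([["7"], ["X"], ["7"]], "7")

def Spec_count_vertical_trapped_x (board : List (List String)) (num : String) (out : Bool × Int) : Prop := out = count_vertical_trapped_x_alt board num
instance (board : List (List String)) (num : String) (out : Bool × Int) : Decidable (Spec_count_vertical_trapped_x board num out) := by unfold Spec_count_vertical_trapped_x; infer_instance

-- ===== CLAIM (what is proved, stated in full; the proofs are below) =====
def Claim_equal_count_vertical_trapped_x : Prop := ∀ (board : List (List String)) (num : String), Dom_count_vertical_trapped_x board num → Pre_count_vertical_trapped_x board num → Spec_count_vertical_trapped_x board num (count_vertical_trapped_x board num)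

-- ===== LEMMAS AND PROOFS =====

-- proof-side name for the column B extracts (definitionally the `let col` of the port)
def pvColB (board : List (List String)) (c : Int) : List String :=
  board.map (fun row => PySem.List.pyGetD row c "")

-- the amount B's inner column loop adds, as a structural function of the column
def pvF (num : String) : Bool → List String → Int
  | _, [] => 0
  | seen, v :: rest =>
    (if v = "X" ∧ seen = true ∧ num ∈ rest then 1 else 0)
      + pvF num (seen || decide (v = num)) rest

theorem pvColLoop_eq_F (num : String) (col : List String) (seen : Bool) (count : Int) :
    pvColLoop num col seen (col.count num : Int) count = count + pvF num seen col := by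
  induction col generalizing seen count with
  | nil => simp [pvColLoop, pvF]
  | cons v rest ih =>
    have hrem : (if v = num then ((v :: rest).count num : Int) - 1 else ((v :: rest).count num : Int))
        = (rest.count num : Int) := by
      by_cases h : v = num <;> simp [h]
    have hmem : (0 < (rest.count num : Int)) ↔ num ∈ rest := by
      rw [show (0 : Int) < (rest.count num : Int) ↔ 0 < rest.count num by exact_mod_cast Iff.rfl]
      exact List.count_pos_iff
    have hseen : (if v = num then true else seen) = (seen || decide (v = num)) := by
      by_cases h : v = num <;> simp [h]
    simp only [pvColLoop, hrem, hseen]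
    rw [ih]
    simp only [pvF, hmem]
    by_cases hx : v = "X" ∧ seen = true ∧ num ∈ rest <;> simp [hx] <;> omega

-- the indicator A adds at cell (r, c)
def pvIndA (board : List (List String)) (num : String) (rows : Int) (r c : Int) : Int :=
  if pvCellA board r c = "X"
      ∧ pvScanA board num c (PySem.List.pyRange (r - 1) (-1) (-1)) = true
      ∧ pvScanA board num c (PySem.List.pyRange (r + 1) rows 1) = true
  then 1 else 0

theorem pvScanA_any (board : List (List String)) (num : String) (c : Int) (l : List Int) :
    pvScanA board num c l = l.any (fun rr => decide (pvCellA board rr c = num)) := by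
  induction l with
  | nil => rfl
  | cons rr rest ih =>
    by_cases h : pvCellA board rr c = num <;> simp [pvScanA, h, ih]

theorem list_sum_range (n : Nat) (f : Nat → Int) :
    ((List.range n).map f).sum = ∑ i ∈ Finset.range n, f i := rfl

theorem pvCellA_col (board : List (List String)) (c r : Int) :
    PySem.List.pyGetD (pvColB board c) r "" = pvCellA board r c := by
  have h : PySem.List.pyGetD ([] : List String) c "" = "" := by
    simp [PySem.List.pyGetD, PySem.List.pyGet?]
  conv_lhs => rw [show ("" : String) = PySem.List.pyGetD ([] : List String) c "" from h.symm]
  rw [pvColB, PySem.List.pyGetD_map]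
  rfl

theorem pv_scan_above (num : String) (col : List String) (i : Nat) (hi : i ≤ col.length) :
    (PySem.List.pyRange ((i : Int) - 1) (-1) (-1)).any
        (fun rr => decide (PySem.List.pyGetD col rr "" = num))
      = decide (num ∈ col.take i) := by
  rw [Bool.eq_iff_iff]
  simp only [List.any_eq_true, decide_eq_true_eq, PySem.List.mem_pyRange_neg_one,
    List.mem_take_iff_getElem]
  constructor
  · rintro ⟨rr, ⟨h1, h2⟩, h3⟩
    obtain ⟨m, rfl⟩ : ∃ m : Nat, rr = (m : Int) := ⟨rr.toNat, (Int.toNat_of_nonneg (by omega)).symm⟩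
    rw [PySem.List.pyGetD_natCast] at h3
    have hm : m < i := by omega
    have hml : m < col.length := lt_of_lt_of_le hm hi
    refine ⟨m, by omega, ?_⟩
    rw [← List.getD_eq_getElem col "" hml]; exact h3
  · rintro ⟨m, hm, h3⟩
    refine ⟨(m : Int), ⟨by omega, by omega⟩, ?_⟩
    rw [PySem.List.pyGetD_natCast, List.getD_eq_getElem col "" (by omega)]
    exact h3

theorem pv_scan_below (num : String) (col : List String) (i : Nat) :
    (PySem.List.pyRange ((i : Int) + 1) (col.length : Int) 1).any
        (fun rr => decide (PySem.List.pyGetD col rr "" = num))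
      = decide (num ∈ col.drop (i + 1)) := by
  rw [Bool.eq_iff_iff]
  simp only [List.any_eq_true, decide_eq_true_eq, PySem.List.mem_pyRange_one,
    List.mem_drop_iff_getElem]
  constructor
  · rintro ⟨rr, ⟨h1, h2⟩, h3⟩
    obtain ⟨m, rfl⟩ : ∃ m : Nat, rr = (m : Int) := ⟨rr.toNat, (Int.toNat_of_nonneg (by omega)).symm⟩
    rw [PySem.List.pyGetD_natCast] at h3
    refine ⟨m - (i + 1), by omega, ?_⟩
    rw [← List.getD_eq_getElem col "" (by omega), show i + 1 + (m - (i + 1)) = m by omega]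
    exact h3
  · rintro ⟨m, hm, h3⟩
    refine ⟨((i + 1 + m : Nat) : Int), ⟨by omega, by omega⟩, ?_⟩
    rw [PySem.List.pyGetD_natCast, List.getD_eq_getElem col "" (by omega)]
    exact h3

theorem pvIndA_eq (board : List (List String)) (num : String) (i j : Nat)
    (hi : i < board.length) :
    pvIndA board num (board.length : Int) (i : Int) (j : Int)
      = (if (pvColB board (j : Int)).getD i "" = "X"
              ∧ ((false = true) ∨ num ∈ (pvColB board (j : Int)).take i)
              ∧ num ∈ (pvColB board (j : Int)).drop (i + 1)
         then (1 : Int) else 0) := by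
  have hlen : ((pvColB board (j : Int)).length : Int) = (board.length : Int) := by
    simp [pvColB]
  have hcell : ∀ r : Int, pvCellA board r (j : Int) = PySem.List.pyGetD (pvColB board (j : Int)) r "" :=
    fun r => (pvCellA_col board (j : Int) r).symm
  rw [pvIndA, pvScanA_any, pvScanA_any]
  simp only [hcell]
  rw [← hlen, pv_scan_above num _ i (by simp [pvColB]; omega), pv_scan_below num _ i,
    PySem.List.pyGetD_natCast]
  simp

theorem pvF_char (num : String) (col : List String) (seen : Bool) :
    pvF num seen col = ∑ k ∈ Finset.range col.length,
      (if col.getD k "" = "X" ∧ (seen = true ∨ num ∈ col.take k) ∧ num ∈ col.drop (k + 1)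
       then (1 : Int) else 0) := by
  induction col generalizing seen with
  | nil => simp [pvF]
  | cons v rest ih =>
    rw [pvF, List.length_cons, Finset.sum_range_succ', ih (seen || decide (v = num))]
    have h0 : (if (v :: rest).getD 0 "" = "X" ∧ (seen = true ∨ num ∈ (v :: rest).take 0)
            ∧ num ∈ (v :: rest).drop (0 + 1) then (1 : Int) else 0)
        = (if v = "X" ∧ seen = true ∧ num ∈ rest then (1 : Int) else 0) := by
      simp
    have hs : ∀ k ∈ Finset.range rest.length,
        (if rest.getD k "" = "X" ∧ ((seen || decide (v = num)) = true ∨ num ∈ rest.take k)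
            ∧ num ∈ rest.drop (k + 1) then (1 : Int) else 0)
          = (if (v :: rest).getD (k + 1) "" = "X" ∧ (seen = true ∨ num ∈ (v :: rest).take (k + 1))
                ∧ num ∈ (v :: rest).drop (k + 1 + 1) then (1 : Int) else 0) := by
      intro k _
      congr 1
      simp only [List.getD_cons_succ, List.take_succ_cons, List.drop_succ_cons, List.mem_cons,
        Bool.or_eq_true, decide_eq_true_eq, eq_iff_iff]
      constructor
      · rintro ⟨h1, h2, h3⟩
        refine ⟨h1, ?_, h3⟩
        rcases h2 with (h | h) | h
        · exact Or.inl h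
        · exact Or.inr (Or.inl h.symm)
        · exact Or.inr (Or.inr h)
      · rintro ⟨h1, h2, h3⟩
        refine ⟨h1, ?_, h3⟩
        rcases h2 with h | h | h
        · exact Or.inl (Or.inl h)
        · exact Or.inl (Or.inr h.symm)
        · exact Or.inr h
    rw [Finset.sum_congr rfl hs, h0]
    ring

theorem pv_ports_eq (board : List (List String)) (num : String) :
    count_vertical_trapped_x board num = count_vertical_trapped_x_alt board num := by
  simp only [count_vertical_trapped_x, count_vertical_trapped_x_alt]
  set rowsN := board.length with hrowsN
  set colsN := (PySem.List.pyGetD board 0 []).length with hcolsN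
  -- A's count as a double sum of per-cell indicators
  have hstepA : (fun (count : Int) (r : Int) =>
      (PySem.List.pyRange 0 (colsN : Int) 1).foldl (fun count c =>
        if pvCellA board r c = "X" then
          if pvScanA board num c (PySem.List.pyRange (r - 1) (-1) (-1))
              && pvScanA board num c (PySem.List.pyRange (r + 1) (rowsN : Int) 1)
          then count + 1 else count
        else count) count)
      = (fun (count : Int) (r : Int) => count +
          ((PySem.List.pyRange 0 (colsN : Int) 1).map
            (fun c => pvIndA board num (rowsN : Int) r c)).sum) := by
    funext count r
    rw [show (fun (count : Int) (c : Int) =>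
        if pvCellA board r c = "X" then
          if pvScanA board num c (PySem.List.pyRange (r - 1) (-1) (-1))
              && pvScanA board num c (PySem.List.pyRange (r + 1) (rowsN : Int) 1)
          then count + 1 else count
        else count)
        = (fun (count : Int) (c : Int) => count + pvIndA board num (rowsN : Int) r c) from ?_]
    · exact PySem.List.foldl_add _ _ _
    · funext count c
      by_cases h1 : pvCellA board r c = "X" <;>
        by_cases h2 : pvScanA board num c (PySem.List.pyRange (r - 1) (-1) (-1)) = true <;>
          by_cases h3 : pvScanA board num c (PySem.List.pyRange (r + 1) (rowsN : Int) 1) = true <;>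
            simp [pvIndA, h1, h2, h3]
  have hA : (PySem.List.pyRange 0 (rowsN : Int) 1).foldl (fun count r =>
      (PySem.List.pyRange 0 (colsN : Int) 1).foldl (fun count c =>
        if pvCellA board r c = "X" then
          if pvScanA board num c (PySem.List.pyRange (r - 1) (-1) (-1))
              && pvScanA board num c (PySem.List.pyRange (r + 1) (rowsN : Int) 1)
          then count + 1 else count
        else count) count) 0
      = ∑ j ∈ Finset.range colsN, pvF num false (pvColB board (j : Int)) := by
    rw [hstepA, PySem.List.foldl_add, PySem.List.pyRange_zero_natCast rowsN, List.map_map,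
      list_sum_range, zero_add]
    have hinner : ∀ i ∈ Finset.range rowsN,
        ((fun r => ((PySem.List.pyRange 0 (colsN : Int) 1).map
            (fun c => pvIndA board num (rowsN : Int) r c)).sum) ∘ (fun k : Nat => (k : Int))) i
        = ∑ j ∈ Finset.range colsN, pvIndA board num (rowsN : Int) (i : Int) (j : Int) := by
      intro i _
      simp only [Function.comp_apply]
      rw [PySem.List.pyRange_zero_natCast colsN, List.map_map, list_sum_range]
      rfl
    rw [Finset.sum_congr rfl hinner, Finset.sum_comm]
    refine (Finset.sum_congr rfl ?_).symm
    intro j _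
    rw [pvF_char]
    have hlen : (pvColB board (j : Int)).length = rowsN := by simp [pvColB, hrowsN]
    rw [hlen]
    refine Finset.sum_congr rfl ?_
    intro i hi
    rw [pvIndA_eq board num i j (Finset.mem_range.mp hi)]
  -- B's count as the same sum per column
  have hstepB : (fun (count : Int) (c : Int) =>
      pvColLoop num (board.map (fun row => PySem.List.pyGetD row c ""))
        false ((board.map (fun row => PySem.List.pyGetD row c "")).count num : Int) count)
      = (fun (count : Int) (c : Int) => count + pvF num false (pvColB board c)) := by
    funext count c
    rw [show board.map (fun row => PySem.List.pyGetD row c "") = pvColB board c from rfl]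
    exact pvColLoop_eq_F num (pvColB board c) false count
  have hB : (PySem.List.pyRange 0 (colsN : Int) 1).foldl (fun count c =>
      pvColLoop num (board.map (fun row => PySem.List.pyGetD row c ""))
        false ((board.map (fun row => PySem.List.pyGetD row c "")).count num : Int) count) 0
      = ∑ j ∈ Finset.range colsN, pvF num false (pvColB board (j : Int)) := by
    rw [hstepB, PySem.List.foldl_add, PySem.List.pyRange_zero_natCast colsN, List.map_map,
      list_sum_range, zero_add]
    rfl
  rw [hA, hB]

-- ===== VERDICT (by name: the statement is the Claim_ definition above) =====
theorem count_vertical_trapped_x_spec : Claim_equal_count_vertical_trapped_x := by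
  intro board num _ _
  unfold Spec_count_vertical_trapped_x
  exact pv_ports_eq board num
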